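-- pv_equiv track=rewrite | github.com/dongzzi101/algorithm | 프로그래머스/0/181929. 원소들의 곱과 합/원소들의 곱과 합.py | solution
-- ===== SOURCE A (Python) =====
-- def solution(num_list):
--     gob = 1
--     hob = 0
--     for num in num_list:
--         gob *= num
--         hob += num
--
--     if (hob * hob) > gob:
--         return 1
--     else:
--         return 0
-- ===== SOURCE B (Python) =====
-- def solution(num_list):
--     counts = {}
--     for num in num_list:
--         counts[num] = counts.get(num, 0) + 1
--     total = 0
--     prod = 1
--     for v, k in counts.items():
--         total += v * k
--         prod *= v ** k
--     return 1 if total * total > prod else 0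
-- ===== Notes on version B (the rewrite author's own statement) =====
-- stated objective: alternative
-- what changed: B first builds a value->multiplicity histogram (dict) in one pass and then computes the sum as sum of v*k and the product as product of v**k over the distinct values, instead of A's direct fused accumulation over every element.
import Mathlib
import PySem

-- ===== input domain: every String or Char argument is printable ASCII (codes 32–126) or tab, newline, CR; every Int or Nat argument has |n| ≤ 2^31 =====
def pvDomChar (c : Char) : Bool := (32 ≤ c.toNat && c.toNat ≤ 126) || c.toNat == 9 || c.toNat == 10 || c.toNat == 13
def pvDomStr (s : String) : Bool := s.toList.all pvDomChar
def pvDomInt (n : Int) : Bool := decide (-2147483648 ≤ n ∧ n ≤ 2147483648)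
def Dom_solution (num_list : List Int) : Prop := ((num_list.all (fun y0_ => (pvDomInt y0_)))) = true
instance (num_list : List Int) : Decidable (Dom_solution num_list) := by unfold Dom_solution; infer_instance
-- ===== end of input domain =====

-- B builds a value→multiplicity histogram (dict) first and aggregates over the distinct values
-- (sum of v*k, product of v^k) instead of A's fused per-element accumulation; alternative algorithm, same result.

-- ===== PORT A =====
def solution (num_list : List Int) : Int :=
  -- gob = 1; hob = 0; for num in num_list: gob *= num; hob += num
  let st := num_list.foldl (fun (p : Int × Int) num => (p.1 * num, p.2 + num)) (1, 0)
  -- if (hob * hob) > gob: return 1 else: return 0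
  if st.2 * st.2 > st.1 then 1 else 0

-- ===== PORT B =====
def solution_alt (num_list : List Int) : Int :=
  -- counts = {}; for num in num_list: counts[num] = counts.get(num, 0) + 1
  let counts : PySem.Dict Int Int :=
    num_list.foldl (fun d num => d.insert num (d.getD num 0 + 1)) PySem.Dict.empty
  -- total = 0; prod = 1; for v, k in counts.items(): total += v * k; prod *= v ** k
  -- (v ** k with the count k ≥ 0 is v ^ k.toNat)
  let st := counts.items.foldl
    (fun (p : Int × Int) kv => (p.1 + kv.1 * kv.2, p.2 * kv.1 ^ kv.2.toNat)) (0, 1)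
  -- return 1 if total * total > prod else 0
  if st.1 * st.1 > st.2 then 1 else 0

-- ===== PRECONDITION & SPEC =====
def Spec_solution (num_list : List Int) (out : Int) : Prop := out = solution_alt num_list
instance (num_list : List Int) (out : Int) : Decidable (Spec_solution num_list out) := by unfold Spec_solution; infer_instance

-- ===== CLAIM (what is proved, stated in full; the proofs are below) =====
def Claim_equal_solution : Prop := ∀ (num_list : List Int), Dom_solution num_list → Spec_solution num_list (solution num_list)

-- ===== LEMMAS AND PROOFS =====

-- A's fused loop computes the pair (product, sum).
theorem fold_eq (l : List Int) (a b : Int) :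
    l.foldl (fun (p : Int × Int) num => (p.1 * num, p.2 + num)) (a, b)
      = (a * l.prod, b + l.sum) := by
  induction l generalizing a b with
  | nil => simp
  | cons x xs ih => simp [List.foldl, ih, mul_assoc, add_assoc]

-- A multiplicative fold is the initial value times the product of the images.
theorem foldl_mul_eq_prod (s : List Int) (f : Int → Int) (b : Int) :
    s.foldl (fun a k => a * f k) b = b * (s.map f).prod := by
  induction s generalizing b with
  | nil => simp
  | cons y ys ih => simp [List.foldl, ih, mul_assoc]

-- On a Nodup list containing x, a sum that is f x at x and 0 elsewhere is f x.
theorem sum_ite_single (s : List Int) (x : Int) (f : Int → Int)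
    (hnd : s.Nodup) (hx : x ∈ s) :
    (s.map (fun k => if k = x then f k else 0)).sum = f x := by
  induction s with
  | nil => cases hx
  | cons y ys ih =>
    have hyys : y ∉ ys := (List.nodup_cons.mp hnd).1
    rcases List.mem_cons.mp hx with h | h
    · have hz : (ys.map (fun k => if k = x then f k else 0)).sum = 0 := by
        rw [List.sum_eq_zero]
        intro z hzm
        obtain ⟨k, hk, rfl⟩ := List.mem_map.mp hzm
        simp [show k ≠ x from fun he => hyys (h ▸ he ▸ hk)]
      simp [← h, hz]
    · have hy : y ≠ x := fun he => hyys (he ▸ h)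
      simp [hy, ih (List.nodup_cons.mp hnd).2 h]

-- Product analogue: a product that is f x at x and 1 elsewhere is f x.
theorem prod_ite_single (s : List Int) (x : Int) (f : Int → Int)
    (hnd : s.Nodup) (hx : x ∈ s) :
    (s.map (fun k => if k = x then f k else 1)).prod = f x := by
  induction s with
  | nil => cases hx
  | cons y ys ih =>
    have hyys : y ∉ ys := (List.nodup_cons.mp hnd).1
    rcases List.mem_cons.mp hx with h | h
    · have hz : (ys.map (fun k => if k = x then f k else 1)).prod = 1 := by
        refine List.prod_eq_one ?_
        intro z hzm
        obtain ⟨k, hk, rfl⟩ := List.mem_map.mp hzm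
        simp [show k ≠ x from fun he => hyys (h ▸ he ▸ hk)]
      simp [← h, hz]
    · have hy : y ≠ x := fun he => hyys (he ▸ h)
      simp [hy, ih (List.nodup_cons.mp hnd).2 h]

-- Sum of v * multiplicity over the distinct values is the list sum.
theorem counter_sum (l : List Int) :
    ((PySem.Set.ofList l).map (fun k => k * (l.count k : Int))).sum = l.sum := by
  induction l using List.reverseRecOn with
  | nil => simp [PySem.Set.ofList_nil]
  | append_singleton xs x ih =>
    rw [PySem.Set.ofList_append_singleton]
    by_cases hx : x ∈ xs
    · have hx' : x ∈ PySem.Set.ofList xs := by rw [PySem.Set.mem_ofList]; exact hx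
      rw [PySem.Set.add_of_mem hx']
      have hmap : (PySem.Set.ofList xs).map (fun k => k * ((xs ++ [x]).count k : Int))
          = (PySem.Set.ofList xs).map (fun k => k * (xs.count k : Int) + (if k = x then k else 0)) := by
        apply List.map_congr_left
        intro k _
        rw [List.count_append]
        by_cases hk : k = x
        · subst hk; simp; ring
        · have : ¬ x = k := fun he => hk he.symm
          simp [this, hk]
      rw [hmap, List.sum_map_add,
          sum_ite_single _ x _ (PySem.Set.nodup_ofList _) hx']
      simp [ih]
    · rw [PySem.Set.add_of_not_mem (fun h => hx (by rw [PySem.Set.mem_ofList] at h; exact h))]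
      rw [List.map_append, List.sum_append]
      have hmap : (PySem.Set.ofList xs).map (fun k => k * ((xs ++ [x]).count k : Int))
          = (PySem.Set.ofList xs).map (fun k => k * (xs.count k : Int)) := by
        apply List.map_congr_left
        intro k hk
        have : k ≠ x := fun he => hx (he ▸ (by rw [PySem.Set.mem_ofList] at hk; exact hk : k ∈ xs))
        rw [List.count_append]
        have h2 : ¬ x = k := fun he => this he.symm
        simp [h2]
      rw [hmap, ih]
      have : xs.count x = 0 := List.count_eq_zero_of_not_mem hx
      simp [List.count_append, this]

-- Product of v ^ multiplicity over the distinct values is the list product.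
theorem counter_prod (l : List Int) :
    ((PySem.Set.ofList l).map (fun k => k ^ l.count k)).prod = l.prod := by
  induction l using List.reverseRecOn with
  | nil => simp [PySem.Set.ofList_nil]
  | append_singleton xs x ih =>
    rw [PySem.Set.ofList_append_singleton]
    by_cases hx : x ∈ xs
    · have hx' : x ∈ PySem.Set.ofList xs := by rw [PySem.Set.mem_ofList]; exact hx
      rw [PySem.Set.add_of_mem hx']
      have hmap : (PySem.Set.ofList xs).map (fun k => k ^ (xs ++ [x]).count k)
          = (PySem.Set.ofList xs).map (fun k => k ^ xs.count k * (if k = x then k else 1)) := by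
        apply List.map_congr_left
        intro k _
        rw [List.count_append]
        by_cases hk : k = x
        · subst hk; simp [pow_succ]
        · have : ¬ x = k := fun he => hk he.symm
          simp [this, hk]
      rw [hmap, List.prod_map_mul,
          prod_ite_single _ x _ (PySem.Set.nodup_ofList _) hx']
      simp [ih]
    · rw [PySem.Set.add_of_not_mem (fun h => hx (by rw [PySem.Set.mem_ofList] at h; exact h))]
      rw [List.map_append, List.prod_append]
      have hmap : (PySem.Set.ofList xs).map (fun k => k ^ (xs ++ [x]).count k)
          = (PySem.Set.ofList xs).map (fun k => k ^ xs.count k) := by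
        apply List.map_congr_left
        intro k hk
        have : k ≠ x := fun he => hx (he ▸ (by rw [PySem.Set.mem_ofList] at hk; exact hk : k ∈ xs))
        rw [List.count_append]
        have h2 : ¬ x = k := fun he => this he.symm
        simp [h2]
      rw [hmap, ih]
      have : xs.count x = 0 := List.count_eq_zero_of_not_mem hx
      simp [List.count_append, this]

-- ===== VERDICT (by name: the statement is the Claim_ definition above) =====
theorem solution_spec : Claim_equal_solution := by
  intro l _
  unfold Spec_solution
  simp only [solution, solution_alt]
  rw [PySem.Dict.foldl_insert_getD_add_one_eq_counter, PySem.Dict.items_counter]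
  rw [fold_eq]
  rw [PySem.List.foldl_prod_mk (f := fun acc (kv : Int × Int) => acc + kv.1 * kv.2)
      (g := fun acc (kv : Int × Int) => acc * kv.1 ^ kv.2.toNat)]
  rw [List.foldl_map, List.foldl_map]
  rw [show (fun (a : Int) (k : Int) => a + k * (l.count k : Int))
        = (fun a k => a + (fun k => k * (l.count k : Int)) k) from rfl,
      PySem.List.foldl_add]
  rw [show (fun (a : Int) (k : Int) => a * k ^ ((l.count k : Int)).toNat)
        = (fun a k => a * (fun k => k ^ l.count k) k) from by funext a k; simp,
      foldl_mul_eq_prod]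
  rw [counter_sum, counter_prod]
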